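-- pv_equiv track=rewrite | github.com/wick05/110 | infographic.py | unique_words_sml_dict
-- ===== SOURCE A (Python) =====
-- def unique_words_sml_dict(dictionary_of_words):
--     """
--     this function creates a 3 length dictionary of counts of unique words
--     of each length type
--     param: dictionary_of_words is a dict of word(string):frequency(int)
--     return: unique_words_sml_dict is a 3 length dictionary sizecategory(string):frequency(int)
--     """
--     unique_words_sml_dict = {'small':0, 'med':0, 'large':0}
--
--     # iterating through dictionary of unique words, and adding to the counter
--     # of their length categories
--     for key in dictionary_of_words:
--         if len(key) < 5:
--             unique_words_sml_dict['small'] += 1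
--         elif 5 <= len(key) <= 7:
--             unique_words_sml_dict['med'] += 1
--         else:
--             unique_words_sml_dict['large'] += 1
--
--     return unique_words_sml_dict
-- ===== SOURCE B (Python) =====
-- def unique_words_sml_dict(dictionary_of_words):
--     small = sum(1 for k in dictionary_of_words if len(k) < 5)
--     med = sum(1 for k in dictionary_of_words if 5 <= len(k) <= 7)
--     large = sum(1 for k in dictionary_of_words if len(k) > 7)
--     return {'small': small, 'med': med, 'large': large}
-- ===== Notes on version B (the rewrite author's own statement) =====
-- stated objective: alternative
-- what changed: Replaces the single loop that mutates a counter dict through if/elif/else branches by three independent filtered-count passes over the keys (one per length bucket), building the result dict from the three totals at the end.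
import Mathlib
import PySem

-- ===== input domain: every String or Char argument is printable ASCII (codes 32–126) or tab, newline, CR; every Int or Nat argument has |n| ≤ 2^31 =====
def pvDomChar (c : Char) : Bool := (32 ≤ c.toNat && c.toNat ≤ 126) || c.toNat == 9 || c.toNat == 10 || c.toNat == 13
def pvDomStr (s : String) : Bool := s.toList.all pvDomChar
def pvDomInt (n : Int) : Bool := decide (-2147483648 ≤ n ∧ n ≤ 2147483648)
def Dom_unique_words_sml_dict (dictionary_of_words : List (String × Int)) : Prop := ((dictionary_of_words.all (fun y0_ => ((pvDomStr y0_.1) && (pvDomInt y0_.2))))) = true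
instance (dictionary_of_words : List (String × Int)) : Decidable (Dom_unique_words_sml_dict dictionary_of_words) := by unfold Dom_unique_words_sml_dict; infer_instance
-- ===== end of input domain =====

-- B replaces the single branching loop over a mutable counter dict by three independent
-- filtered-count passes (one per length bucket); same cost, different decomposition.


-- ===== PORT A =====
-- one loop over the keys, incrementing one of three pre-seeded dict counters per key
def unique_words_sml_dict (dictionary_of_words : List (String × Int)) : List (String × Int) :=
  (dictionary_of_words.foldl (fun d kv =>
    if PySem.Str.len kv.1 < 5 then d.modify "small" 0 (· + 1)
    else if 5 ≤ PySem.Str.len kv.1 ∧ PySem.Str.len kv.1 ≤ 7 then d.modify "med" 0 (· + 1)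
    else d.modify "large" 0 (· + 1))
    (PySem.Dict.mk [("small", 0), ("med", 0), ("large", 0)])).items

-- ===== PORT B =====
-- three independent filtered-count passes, then the result built from the totals
def unique_words_sml_dict_alt (dictionary_of_words : List (String × Int)) : List (String × Int) :=
  [("small", (dictionary_of_words.countP (fun kv => PySem.Str.len kv.1 < 5) : Int)),
   ("med", (dictionary_of_words.countP (fun kv => 5 ≤ PySem.Str.len kv.1 && PySem.Str.len kv.1 ≤ 7) : Int)),
   ("large", (dictionary_of_words.countP (fun kv => PySem.Str.len kv.1 > 7) : Int))]

-- ===== PRECONDITION & SPEC =====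
def Spec_unique_words_sml_dict (dictionary_of_words : List (String × Int)) (out : List (String × Int)) : Prop := out = unique_words_sml_dict_alt dictionary_of_words
instance (dictionary_of_words : List (String × Int)) (out : List (String × Int)) : Decidable (Spec_unique_words_sml_dict dictionary_of_words out) := by unfold Spec_unique_words_sml_dict; infer_instance

-- ===== CLAIM (what is proved, stated in full; the proofs are below) =====
def Claim_equal_unique_words_sml_dict : Prop := ∀ (dictionary_of_words : List (String × Int)), Dom_unique_words_sml_dict dictionary_of_words → Spec_unique_words_sml_dict dictionary_of_words (unique_words_sml_dict dictionary_of_words)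

-- ===== LEMMAS AND PROOFS =====

-- one-step modify equations on the three-counter literal dict
theorem uw_step_small (s m g : Int) :
    (PySem.Dict.mk [("small", s), ("med", m), ("large", g)]).modify "small" 0 (· + 1)
    = PySem.Dict.mk [("small", s + 1), ("med", m), ("large", g)] := by
  simp [PySem.Dict.modify, PySem.Dict.insert, PySem.Dict.getD, PySem.Dict.get?, PySem.Dict.contains]

theorem uw_step_med (s m g : Int) :
    (PySem.Dict.mk [("small", s), ("med", m), ("large", g)]).modify "med" 0 (· + 1)
    = PySem.Dict.mk [("small", s), ("med", m + 1), ("large", g)] := by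
  simp [PySem.Dict.modify, PySem.Dict.insert, PySem.Dict.getD, PySem.Dict.get?, PySem.Dict.contains]

theorem uw_step_large (s m g : Int) :
    (PySem.Dict.mk [("small", s), ("med", m), ("large", g)]).modify "large" 0 (· + 1)
    = PySem.Dict.mk [("small", s), ("med", m), ("large", g + 1)] := by
  simp [PySem.Dict.modify, PySem.Dict.insert, PySem.Dict.getD, PySem.Dict.get?, PySem.Dict.contains]

-- loop invariant: folding over l starting from the three-counter dict adds the three bucket counts
theorem uw_foldl_inv (l : List (String × Int)) (s m g : Int) :
    l.foldl (fun d kv =>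
      if PySem.Str.len kv.1 < 5 then d.modify "small" 0 (· + 1)
      else if 5 ≤ PySem.Str.len kv.1 ∧ PySem.Str.len kv.1 ≤ 7 then d.modify "med" 0 (· + 1)
      else d.modify "large" 0 (· + 1))
      (PySem.Dict.mk [("small", s), ("med", m), ("large", g)])
    = PySem.Dict.mk [("small", s + l.countP (fun kv => PySem.Str.len kv.1 < 5)),
                     ("med", m + l.countP (fun kv => 5 ≤ PySem.Str.len kv.1 && PySem.Str.len kv.1 ≤ 7)),
                     ("large", g + l.countP (fun kv => PySem.Str.len kv.1 > 7))] := by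
  induction l generalizing s m g with
  | nil => simp [List.countP]
  | cons kv t ih =>
    rw [List.foldl_cons, List.countP_cons, List.countP_cons, List.countP_cons]
    by_cases h1 : PySem.Str.len kv.1 < 5
    · have hs : decide (PySem.Str.len kv.1 < 5) = true := decide_eq_true h1
      have hm : (decide (5 ≤ PySem.Str.len kv.1) && decide (PySem.Str.len kv.1 ≤ 7)) = false := by
        revert h1; generalize PySem.Str.len kv.1 = n; intro h1; simp; omega
      have hg : decide (PySem.Str.len kv.1 > 7) = false := by
        revert h1; generalize PySem.Str.len kv.1 = n; intro h1; simp; omega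
      rw [if_pos h1, uw_step_small, ih, hs, hm, hg]
      norm_num
      ring
    · by_cases h2 : 5 ≤ PySem.Str.len kv.1 ∧ PySem.Str.len kv.1 ≤ 7
      · have hs : decide (PySem.Str.len kv.1 < 5) = false := by
          revert h1; generalize PySem.Str.len kv.1 = n; intro h1; simp; omega
        have hm : (decide (5 ≤ PySem.Str.len kv.1) && decide (PySem.Str.len kv.1 ≤ 7)) = true := by
          revert h2; generalize PySem.Str.len kv.1 = n; intro h2; simp; omega
        have hg : decide (PySem.Str.len kv.1 > 7) = false := by
          revert h2; generalize PySem.Str.len kv.1 = n; intro h2; simp; omega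
        rw [if_neg h1, if_pos h2, uw_step_med, ih, hs, hm, hg]
        norm_num
        ring
      · have hs : decide (PySem.Str.len kv.1 < 5) = false := by
          revert h1; generalize PySem.Str.len kv.1 = n; intro h1; simp; omega
        have hm : (decide (5 ≤ PySem.Str.len kv.1) && decide (PySem.Str.len kv.1 ≤ 7)) = false := by
          revert h1 h2; generalize PySem.Str.len kv.1 = n; intro h1 h2; simp; omega
        have hg : decide (PySem.Str.len kv.1 > 7) = true := by
          revert h1 h2; generalize PySem.Str.len kv.1 = n; intro h1 h2
          simp at h2 ⊢
          omega
        rw [if_neg h1, if_neg h2, uw_step_large, ih, hs, hm, hg]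
        norm_num
        ring

-- ===== VERDICT (by name: the statement is the Claim_ definition above) =====
theorem unique_words_sml_dict_spec : Claim_equal_unique_words_sml_dict := by
  intro l _
  unfold Spec_unique_words_sml_dict unique_words_sml_dict unique_words_sml_dict_alt
  rw [uw_foldl_inv]
  simp
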